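-- pv_equiv track=rewrite | github.com/jmforsythe/Advent-Of-Code | 2023/13/13.py | grid_symmetries
-- ===== SOURCE A (Python) =====
-- def symmetries(rep):
--     return [i for i in range(len(rep)-1) if all(p == q for p, q in zip(rep[i::-1], rep[i+1:]))]
--
-- def grid_symmetries(grid):
--     m = dict()
--     m2 = dict()
--     for i, line in enumerate(grid):
--         if tuple(line) not in m:
--             m[tuple(line)] = []
--         m[tuple(line)].append(i)
--     for j in range(len(grid[0])):
--         column = [row[j] for row in grid]
--         if tuple(column) not in m2:
--             m2[tuple(column)] = []
--         m2[tuple(column)].append(j)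
--     rep = [0 for _ in grid]
--     rep2 = [0 for _ in grid[0]]
--     for i, k in enumerate(m):
--         v = m[k]
--         for j in v:
--             rep[j] = i
--     for i, k in enumerate(m2):
--         v = m2[k]
--         for j in v:
--             rep2[j] = i
--     return (symmetries(rep), symmetries(rep2))
-- ===== SOURCE B (Python) =====
-- def grid_symmetries(grid):
--     def axes(seq):
--         n = len(seq)
--         out = []
--         for i in range(n - 1):
--             lo, hi = i, i + 1
--             while lo >= 0 and hi < n:
--                 if seq[lo] != seq[hi]:
--                     break
--                 lo -= 1
--                 hi += 1
--             else:
--                 out.append(i)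
--         return out
--     cols = [[row[j] for row in grid] for j in range(len(grid[0]))]
--     return (axes(grid), axes(cols))
-- ===== Notes on version B (the rewrite author's own statement) =====
-- stated objective: simpler
-- what changed: B drops A's whole canonicalisation machinery (two dicts mapping rows/columns to index lists, rewritten into class-index arrays that are then tested with reversed-slice/zip comparisons) and instead tests each candidate axis directly on the rows/columns with an expanding two-pointer mirror scan that stops at the first mismatch.
import Mathlib
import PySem

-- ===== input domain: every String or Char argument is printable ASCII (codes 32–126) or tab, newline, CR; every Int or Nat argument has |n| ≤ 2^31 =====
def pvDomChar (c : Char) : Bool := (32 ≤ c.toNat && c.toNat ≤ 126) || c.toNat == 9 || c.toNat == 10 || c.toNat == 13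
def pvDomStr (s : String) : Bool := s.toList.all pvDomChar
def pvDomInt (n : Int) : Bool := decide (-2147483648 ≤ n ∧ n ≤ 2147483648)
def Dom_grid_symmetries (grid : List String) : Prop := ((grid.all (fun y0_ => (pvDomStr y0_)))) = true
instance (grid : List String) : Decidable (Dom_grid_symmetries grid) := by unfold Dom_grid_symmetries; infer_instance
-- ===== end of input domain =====

-- B replaces A's dict-canonicalisation (rows/columns -> class indices -> slice/zip palindrome test)
-- by a direct expanding two-pointer mirror test on the rows/columns themselves: simpler, no dicts.

-- ===== PORT A =====
-- helper: the dict-building loop `if k not in m: m[k] = []` + `m[k].append(i)`, over (key, index) pairs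
def pvBuild {α : Type} [DecidableEq α] (pairs : List (α × Int)) : PySem.Dict α (List Int) :=
  pairs.foldl (fun d q => d.modify q.1 [] (· ++ [q.2])) PySem.Dict.empty

def pvAssign {α : Type} [DecidableEq α] (m : PySem.Dict α (List Int)) (rep : List Int) : List Int :=
  (PySem.List.enumerate m.keys 0).foldl
    (fun r p => (m.getD p.2 []).foldl (fun r j => PySem.List.pySetD r j p.1) r) rep

-- port of A's helper `symmetries`; rep[i::-1] is slice? (step -1, never none, hence .getD [])
def pvSymmetries (rep : List Int) : List Int :=
  (PySem.List.pyRange 0 ((rep.length : Int) - 1) 1).filter (fun i =>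
    (((PySem.List.slice? rep (some i) none (-1)).getD []).zip
        (PySem.List.slice rep (some (i + 1)) none)).all (fun p => p.1 == p.2))

-- grid[0] / row[j] are in range under Pre_, so the total pyGetD forms are exact there
def grid_symmetries (grid : List String) : List Int × List Int :=
  let m := pvBuild ((PySem.List.enumerate grid 0).map (fun p => (p.2.toList, p.1)))
  let m2 := pvBuild ((PySem.List.pyRange 0 (PySem.Str.len (PySem.List.pyGetD grid 0 "")) 1).map
      (fun j => (grid.map (fun row => PySem.List.pyGetD row.toList j ' '), j)))
  let rep := pvAssign m (grid.map (fun _ => (0 : Int)))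
  let rep2 := pvAssign m2 ((PySem.List.pyGetD grid 0 "").toList.map (fun _ => (0 : Int)))
  (pvSymmetries rep, pvSymmetries rep2)

-- ===== PORT B =====
-- B's `while lo >= 0 and hi < n: if seq[lo] != seq[hi]: break ...` loop; both indices are in
-- range whenever the elements are compared, so the getElem? comparison is exact
def pvExpand {α : Type} [DecidableEq α] (seq : List α) (lo : Int) (hi : Nat) : Bool :=
  if h : 0 ≤ lo ∧ hi < seq.length then
    if seq[lo.toNat]? = seq[hi]? then pvExpand seq (lo - 1) (hi + 1) else false
  else true
termination_by seq.length - hi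
decreasing_by omega

-- B's helper `axes`
def pvAxes {α : Type} [DecidableEq α] (seq : List α) : List Int :=
  (PySem.List.pyRange 0 ((seq.length : Int) - 1) 1).foldl
    (fun out i => if pvExpand seq i (i + 1).toNat then out ++ [i] else out) []

def grid_symmetries_alt (grid : List String) : List Int × List Int :=
  let cols : List (List Char) :=
    (PySem.List.pyRange 0 (PySem.Str.len (PySem.List.pyGetD grid 0 "")) 1).map
      (fun j => grid.map (fun row => PySem.List.pyGetD row.toList j ' '))
  (pvAxes grid, pvAxes cols)


-- ===== PRECONDITION & SPEC =====
-- A raises IndexError on the empty grid (grid[0]) and when some row is shorter than the first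
-- row (row[j] in the column loop); Pre_ excludes exactly those inputs.
def Pre_grid_symmetries (grid : List String) : Prop :=
  grid ≠ [] ∧ ∀ s ∈ grid, (grid.headD "").toList.length ≤ s.toList.length
instance (grid : List String) : Decidable (Pre_grid_symmetries grid) := by
  unfold Pre_grid_symmetries; infer_instance
def pvWitness_grid_symmetries : List String := ["#.", "#.", "..", "#."]

def Spec_grid_symmetries (grid : List String) (out : List Int × List Int) : Prop := out = grid_symmetries_alt grid
instance (grid : List String) (out : List Int × List Int) : Decidable (Spec_grid_symmetries grid out) := by unfold Spec_grid_symmetries; infer_instance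

-- ===== CLAIM (what is proved, stated in full; the proofs are below) =====
def Claim_equal_grid_symmetries : Prop := ∀ (grid : List String), Dom_grid_symmetries grid → Pre_grid_symmetries grid → Spec_grid_symmetries grid (grid_symmetries grid)

-- ===== LEMMAS AND PROOFS =====
def pvPredP {α : Type} (u : List α) (a : Nat) : Prop :=
  ∀ t : Nat, t ≤ a → a + 1 + t < u.length → u[a - t]? = u[a + 1 + t]?

theorem pvExpand_iff {α : Type} [DecidableEq α] (seq : List α) (lo : Int) (hi : Nat) :
    pvExpand seq lo hi = true ↔
      ∀ t : Nat, 0 ≤ lo - t → hi + t < seq.length → seq[(lo - t).toNat]? = seq[hi + t]? := by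
  fun_induction pvExpand seq lo hi with
  | case1 lo hi h heq ih =>
    rw [ih]
    constructor
    · intro H t h1 h2
      match t with
      | 0 => simpa using heq
      | t + 1 =>
        have := H t (by omega) (by omega)
        have e1 : (lo - 1 - t : Int) = lo - (t+1 : Nat) := by push_cast; ring
        rw [e1] at this
        have e2 : hi + 1 + t = hi + (t + 1) := by omega
        rw [e2] at this
        exact this
    · intro H t h1 h2
      have := H (t + 1) (by push_cast; omega) (by omega)
      have e1 : (lo - (t+1 : Nat) : Int) = lo - 1 - t := by push_cast; ring
      rw [e1] at this
      have e2 : hi + (t + 1) = hi + 1 + t := by omega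
      rw [e2] at this
      exact this
  | case2 lo hi h hne =>
    simp only [Bool.false_eq_true, false_iff]
    intro H
    exact hne (by simpa using H 0 (by omega) (by omega))
  | case3 lo hi h =>
    simp only [true_iff]
    intro t h1 h2
    omega
theorem pvExpand_iff_pred {α : Type} [DecidableEq α] (seq : List α) (a : Nat) :
    pvExpand seq (a : Int) ((a : Int) + 1).toNat = true ↔ pvPredP seq a := by
  have e0 : ((a : Int) + 1).toNat = a + 1 := by omega
  rw [e0, pvExpand_iff]
  unfold pvPredP
  constructor
  · intro H t h1 h2
    have := H t (by omega) (by omega)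
    have e1 : ((a : Int) - t).toNat = a - t := by omega
    rwa [e1] at this
  · intro H t h1 h2
    have := H t (by omega) (by omega)
    have e1 : ((a : Int) - t).toNat = a - t := by omega
    rwa [e1]

theorem pvZipAll_iff {α : Type} [DecidableEq α] (u v : List α) :
    ((u.zip v).all (fun p => p.1 == p.2)) = true ↔
      ∀ k : Nat, k < min u.length v.length → u[k]? = v[k]? := by
  induction u generalizing v with
  | nil => simp
  | cons x u ih =>
    cases v with
    | nil => simp
    | cons y v =>
      simp only [List.zip_cons_cons, List.all_cons, Bool.and_eq_true, beq_iff_eq, ih]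
      constructor
      · rintro ⟨h1, h2⟩ k hk
        match k with
        | 0 => simpa using h1
        | k + 1 =>
          simpa using h2 k (by simp at hk ⊢; omega)
      · intro H
        refine ⟨by simpa using H 0 (by simp), fun k hk => ?_⟩
        simpa using H (k + 1) (by simp at hk ⊢; omega)
theorem pvFilterMapRev (u : List Int) : ∀ (m : Nat), m < u.length →
    List.filterMap (fun k => u[m - k]?) (List.range (m + 1)) = (u.take (m + 1)).reverse := by
  intro m
  induction m with
  | zero =>
    intro h
    simp [List.range_succ, List.take_add_one, List.getElem?_eq_getElem h]
  | succ m ih =>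
    intro h
    rw [List.range_succ_eq_map]
    rw [List.filterMap_cons]
    have h0 : u[m + 1 - 0]? = some u[m+1] := List.getElem?_eq_getElem h
    simp only [Nat.sub_zero] at h0 ⊢
    rw [h0]
    rw [List.filterMap_map]
    have : (fun k => u[m + 1 - (k+1)]?) = (fun k => u[m - k]?) := by
      funext k; congr 1; omega
    have e2 : ((fun k => u[m + 1 - k]?) ∘ Nat.succ) = (fun k => u[m - k]?) := by
      funext k; simp only [Function.comp]; congr 1; omega
    rw [e2, ih (by omega)]
    simp [List.take_add_one, List.getElem?_eq_getElem h]

theorem pvSliceNeg (u : List Int) (a : Nat) (ha : a < u.length) :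
    PySem.List.slice? u (some (a : Int)) none (-1) = some ((u.take (a + 1)).reverse) := by
  simp only [PySem.List.slice?, PySem.List.sliceIndices]
  norm_num
  have h1 : ¬ ((a : Int) < 0) := by omega
  have h2 : min (a : Int) ((u.length : Int) - 1) = (a : Int) := by omega
  simp only [h1, if_false, h2]
  have h3 : (-1 : Int) < (a : Int) := by omega
  simp only [h3, if_true]
  have h4 : ((a : Int) + 1).toNat = a + 1 := by omega
  rw [h4]
  have h5 : (fun k : Nat => u[((a : Int) + -(k : Int)).toNat]?) = (fun k : Nat => u[a - k]?) := by
    funext k; congr 1; omega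
  rw [h5, pvFilterMapRev u a ha]
theorem pvSymmPred_iff (u : List Int) (a : Nat) (ha : a + 1 ≤ u.length) :
    ((((PySem.List.slice? u (some (a : Int)) none (-1)).getD []).zip
        (PySem.List.slice u (some ((a : Int) + 1)) none)).all (fun p => p.1 == p.2)) = true
      ↔ pvPredP u a := by
  rw [pvSliceNeg u a (by omega)]
  have e1 : ((a : Int) + 1) = ((a + 1 : Nat) : Int) := by push_cast; ring
  rw [e1, PySem.List.slice_from_natCast]
  simp only [Option.getD_some]
  rw [pvZipAll_iff]
  have lrev : (u.take (a+1)).reverse.length = a + 1 := by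
    simp [List.length_take]; omega
  have heq : ∀ k : Nat, k < a + 1 → k < u.length - (a + 1) →
      ((u.take (a+1)).reverse[k]? = (u.drop (a+1))[k]? ↔ u[a - k]? = u[a + 1 + k]?) := by
    intro k h1 h2
    rw [List.getElem?_reverse (by simp [List.length_take]; omega), List.getElem?_take, List.getElem?_drop]
    have e2 : (u.take (a+1)).length - 1 - k = a - k := by simp [List.length_take]; omega
    rw [e2]
    simp only [if_pos (by omega : a - k < a + 1)]
  unfold pvPredP
  constructor
  · intro H t h1 h2
    exact (heq t (by omega) (by omega)).1 (H t (by rw [lrev, List.length_drop]; omega))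
  · intro H k hk
    rw [lrev, List.length_drop] at hk
    exact (heq k (by omega) (by omega)).2 (H k (by omega) (by omega))
theorem pvAxes_eq_filter {α : Type} [DecidableEq α] (seq : List α) :
    pvAxes seq = (PySem.List.pyRange 0 ((seq.length : Int) - 1) 1).filter
      (fun i => pvExpand seq i (i + 1).toNat) := by
  unfold pvAxes
  have := PySem.List.foldl_append_if (fun i => pvExpand seq i (i + 1).toNat) (id : Int → Int)
    (PySem.List.pyRange 0 ((seq.length : Int) - 1) 1) []
  simpa using this
theorem pvSetFold_length (P : List Int) (r : List Int) (v : Int) :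
    (P.foldl (fun r t => PySem.List.pySetD r t v) r).length = r.length := by
  induction P generalizing r with
  | nil => rfl
  | cons x P ih => simp [List.foldl_cons, ih, PySem.List.length_pySetD]

theorem pvAssign_length {α : Type} [DecidableEq α] (m : PySem.Dict α (List Int)) (rep : List Int) :
    (pvAssign m rep).length = rep.length := by
  unfold pvAssign
  generalize (PySem.List.enumerate m.keys 0) = L
  induction L generalizing rep with
  | nil => rfl
  | cons p L ih => simp [List.foldl_cons, ih, pvSetFold_length]

theorem pvSetFold_getElem? (P : List Int) (r : List Int) (v : Int) (j : Nat)
    (hP : ∀ x ∈ P, 0 ≤ x) :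
    (P.foldl (fun r t => PySem.List.pySetD r t v) r)[j]? =
      if ((j : Int) ∈ P ∧ j < r.length) then some v else r[j]? := by
  induction P generalizing r with
  | nil => simp
  | cons x P ih =>
    rw [List.foldl_cons]
    rw [ih _ (fun y hy => hP y (List.mem_cons_of_mem _ hy))]
    rw [PySem.List.pySetD_of_nonneg _ _ (hP x (List.mem_cons_self))]
    rw [List.length_set]
    have hxnn := hP x List.mem_cons_self
    by_cases hj : j < r.length
    · by_cases hp : ((j : Int) ∈ P)
      · simp [hp, hj, List.mem_cons]
      · rw [if_neg (by tauto), List.getElem?_set]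
        by_cases hx : x = (j : Int)
        · have hxt : x.toNat = j := by omega
          simp [hj, List.mem_cons, hx]
        · have hxt : x.toNat ≠ j := by omega
          have hjx : ((j : Int) ∈ x :: P) ↔ False := by
            simp [List.mem_cons, hp]
            omega
          simp [hxt, hjx]
    · have hr : r[j]? = none := List.getElem?_eq_none (by omega)
      have hs : (r.set x.toNat v)[j]? = none := List.getElem?_eq_none (by simp; omega)
      simp [hj]
theorem pvBuild_getD {α : Type} [DecidableEq α] (pairs : List (α × Int)) (c : α) :
    (pvBuild pairs).getD c [] = (pairs.filter (fun q => q.1 == c)).map (·.2) := by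
  unfold pvBuild
  rw [PySem.Dict.getD_foldl_modify_append]
  simp

theorem pvBuild_getD_mem {α : Type} [DecidableEq α] (xs : List α) (c : α) (x : Int) :
    x ∈ (pvBuild ((PySem.List.enumerate xs 0).map Prod.swap)).getD c [] ↔
      ∃ k : Nat, ∃ h : k < xs.length, xs[k] = c ∧ x = (k : Int) := by
  rw [pvBuild_getD]
  simp only [List.mem_map, List.mem_filter]
  constructor
  · rintro ⟨q, ⟨⟨p, hp, rfl⟩, hc⟩, hx⟩
    rw [PySem.List.mem_enumerate_iff] at hp
    obtain ⟨k, hk, rfl⟩ := hp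
    refine ⟨k, hk, by simpa using hc, by simpa using hx.symm⟩
  · rintro ⟨k, hk, hc, rfl⟩
    refine ⟨((xs[k], (k : Int))), ⟨⟨((k : Int), xs[k]),
      by rw [PySem.List.mem_enumerate_iff]; exact ⟨k, hk, by simp⟩, rfl⟩, by simpa using hc⟩, rfl⟩

theorem pvBuild_keys {α : Type} [DecidableEq α] (xs : List α) :
    (pvBuild ((PySem.List.enumerate xs 0).map Prod.swap)).keys = PySem.Set.ofList xs := by
  unfold pvBuild
  have h := PySem.Dict.keys_foldl_modify_key ((PySem.List.enumerate xs 0).map Prod.swap)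
    (Prod.fst) ([] : List Int) (fun _ q => (· ++ [q.2])) PySem.Dict.empty
  simp only at h
  rw [h]
  have : ((PySem.List.enumerate xs 0).map Prod.swap).map Prod.fst = xs := by
    rw [List.map_map]
    have : (Prod.fst ∘ Prod.swap : Int × α → α) = Prod.snd := rfl
    rw [this, PySem.List.map_snd_enumerate]
  rw [this]
  rfl
theorem pvAssignGen {α : Type} [DecidableEq α] (xs : List α) (j : Nat) (hjx : j < xs.length) :
    ∀ (L : List (Int × α)) (r : List Int), j < r.length →
    ((L.foldl (fun r p => (((pvBuild ((PySem.List.enumerate xs 0).map Prod.swap)).getD p.2 []).foldl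
        (fun r t => PySem.List.pySetD r t p.1) r)) r)[j]? =
      match L.reverse.find? (fun p => p.2 == xs[j]) with
      | some p => some p.1
      | none => r[j]?) := by
  intro L
  set M := pvBuild ((PySem.List.enumerate xs 0).map Prod.swap) with hM
  have hnn : ∀ (c : α) (x : Int), x ∈ M.getD c [] → 0 ≤ x := by
    intro c x hx
    rw [hM, pvBuild_getD_mem] at hx
    obtain ⟨k, hk, _, rfl⟩ := hx
    omega
  have hmem : ∀ c : α, ((j : Int) ∈ M.getD c [] ↔ xs[j] = c) := by
    intro c
    rw [hM, pvBuild_getD_mem]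
    constructor
    · rintro ⟨k, hk, hc, hkj⟩
      have : k = j := by omega
      subst this; exact hc
    · intro h; exact ⟨j, hjx, h, rfl⟩
  induction L with
  | nil => intro r _; simp
  | cons p L ih =>
    intro r hj
    rw [List.foldl_cons]
    have hlen : j < ((M.getD p.2 []).foldl (fun r t => PySem.List.pySetD r t p.1) r).length := by
      rw [pvSetFold_length]; exact hj
    rw [ih _ hlen]
    rw [List.reverse_cons, List.find?_append]
    cases hfind : L.reverse.find? (fun q => q.2 == xs[j]) with
    | some q => simp [Option.or]
    | none =>
      simp only [Option.none_or]
      rw [pvSetFold_getElem? _ _ _ _ (hnn p.2)]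
      by_cases hc : xs[j] = p.2
      · rw [if_pos ⟨(hmem p.2).2 hc, hj⟩]
        simp [hc]
      · rw [if_neg (by rw [hmem p.2]; tauto)]
        have hnone : List.find? (fun q => q.2 == xs[j]) [p] = none := by
          have hb : (p.2 == xs[j]) = false := by
            simp only [beq_eq_false_iff_ne]; intro h; exact hc h.symm
          simp [hb]
        rw [hnone]
theorem pvFind_shape {α : Type} [DecidableEq α] (ys : List α) (c : α) (p : Int × α)
    (h : (PySem.List.enumerate ys 0).reverse.find? (fun q => q.2 == c) = some p) :
    ∃ k : Nat, ∃ hk : k < ys.length, p.1 = (k : Int) ∧ ys[k] = c := by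
  have hm := List.mem_of_find?_eq_some h
  rw [List.mem_reverse, PySem.List.mem_enumerate_iff] at hm
  obtain ⟨k, hk, rfl⟩ := hm
  have hp := List.find?_some h
  simp only [beq_iff_eq] at hp
  exact ⟨k, hk, by simp, hp⟩

theorem pvFind_isSome {α : Type} [DecidableEq α] (ys : List α) (c : α) (hc : c ∈ ys) :
    ((PySem.List.enumerate ys 0).reverse.find? (fun q => q.2 == c)).isSome = true := by
  rw [List.find?_isSome]
  obtain ⟨k, hk, rfl⟩ := List.mem_iff_getElem.1 hc
  refine ⟨((0 : Int) + (k : Int), ys[k]), ?_, by simp⟩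
  rw [List.mem_reverse, PySem.List.mem_enumerate_iff]
  exact ⟨k, hk, rfl⟩

theorem pvRep_pattern {α : Type} [DecidableEq α] (xs : List α) (a b : Nat)
    (ha : a < xs.length) (hb : b < xs.length) :
    ((pvAssign (pvBuild ((PySem.List.enumerate xs 0).map Prod.swap)) (List.replicate xs.length (0 : Int)))[a]? =
     (pvAssign (pvBuild ((PySem.List.enumerate xs 0).map Prod.swap)) (List.replicate xs.length (0 : Int)))[b]?)
      ↔ xs[a]? = xs[b]? := by
  set M := pvBuild ((PySem.List.enumerate xs 0).map Prod.swap) with hM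
  have hga := pvAssignGen xs a ha (PySem.List.enumerate M.keys 0) (List.replicate xs.length 0)
    (by simp [ha])
  have hgb := pvAssignGen xs b hb (PySem.List.enumerate M.keys 0) (List.replicate xs.length 0)
    (by simp [hb])
  have hmemkeys : ∀ (j : Nat) (hj : j < xs.length), xs[j] ∈ M.keys := by
    intro j hj
    rw [hM, pvBuild_keys]
    exact (PySem.Set.mem_ofList xs xs[j]).2 (List.getElem_mem hj)
  have hassign : ∀ r, pvAssign M r =
      (PySem.List.enumerate M.keys 0).foldl
        (fun r p => ((M.getD p.2 []).foldl (fun r t => PySem.List.pySetD r t p.1) r)) r := fun _ => rfl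
  rw [← hM] at hga hgb
  rw [hassign]
  cases hfa : (PySem.List.enumerate M.keys 0).reverse.find? (fun q => q.2 == xs[a]) with
  | none =>
    exact absurd (hfa ▸ pvFind_isSome M.keys xs[a] (hmemkeys a ha)) (by simp)
  | some pa =>
    cases hfb : (PySem.List.enumerate M.keys 0).reverse.find? (fun q => q.2 == xs[b]) with
    | none =>
      exact absurd (hfb ▸ pvFind_isSome M.keys xs[b] (hmemkeys b hb)) (by simp)
    | some pb =>
      rw [hga, hgb, hfa, hfb]
      simp only []
      obtain ⟨ka, hka, hpa1, hpa2⟩ := pvFind_shape M.keys xs[a] pa hfa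
      obtain ⟨kb, hkb, hpb1, hpb2⟩ := pvFind_shape M.keys xs[b] pb hfb
      constructor
      · intro h
        have h1 : pa.1 = pb.1 := by simpa using h
        rw [hpa1, hpb1] at h1
        have hk : ka = kb := by exact_mod_cast h1
        subst hk
        rw [List.getElem?_eq_getElem ha, List.getElem?_eq_getElem hb, ← hpa2, ← hpb2]
      · intro h
        rw [List.getElem?_eq_getElem ha, List.getElem?_eq_getElem hb] at h
        have hxx : xs[a] = xs[b] := by simpa using h
        rw [hxx] at hfa
        rw [hfa] at hfb
        simp only [Option.some_inj] at hfb
        rw [hfb]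
theorem pvPred_transfer {α β : Type} (u : List α) (v : List β) (a : Nat)
    (hl : u.length = v.length)
    (hp : ∀ x y : Nat, x < v.length → y < v.length → (u[x]? = u[y]? ↔ v[x]? = v[y]?)) :
    pvPredP u a ↔ pvPredP v a := by
  unfold pvPredP
  rw [hl]
  constructor
  · intro H t h1 h2
    exact (hp (a - t) (a + 1 + t) (by omega) h2).1 (H t h1 h2)
  · intro H t h1 h2
    exact (hp (a - t) (a + 1 + t) (by omega) h2).2 (H t h1 h2)

theorem pvAxes_congr {α β : Type} [DecidableEq α] [DecidableEq β] (u : List α) (v : List β)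
    (hl : u.length = v.length)
    (hp : ∀ a b : Nat, a < v.length → b < v.length → (u[a]? = u[b]? ↔ v[a]? = v[b]?)) :
    pvAxes u = pvAxes v := by
  rw [pvAxes_eq_filter, pvAxes_eq_filter, hl]
  apply List.filter_congr
  intro i hi
  rw [PySem.List.mem_pyRange_one] at hi
  obtain ⟨a, rfl⟩ : ∃ a : Nat, i = (a : Int) := ⟨i.toNat, by omega⟩
  rw [Bool.eq_iff_iff, pvExpand_iff_pred, pvExpand_iff_pred]
  exact pvPred_transfer u v a hl hp

theorem pvCore {α : Type} [DecidableEq α] (xs : List α) :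
    pvSymmetries (pvAssign (pvBuild ((PySem.List.enumerate xs 0).map Prod.swap))
        (List.replicate xs.length (0 : Int))) = pvAxes xs := by
  set REP := pvAssign (pvBuild ((PySem.List.enumerate xs 0).map Prod.swap))
    (List.replicate xs.length (0 : Int)) with hREP
  have hlen : REP.length = xs.length := by
    rw [hREP, pvAssign_length, List.length_replicate]
  rw [pvAxes_eq_filter]
  unfold pvSymmetries
  rw [hlen]
  apply List.filter_congr
  intro i hi
  rw [PySem.List.mem_pyRange_one] at hi
  obtain ⟨a, rfl⟩ : ∃ a : Nat, i = (a : Int) := ⟨i.toNat, by omega⟩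
  rw [Bool.eq_iff_iff, pvExpand_iff_pred, pvSymmPred_iff REP a (by omega)]
  exact pvPred_transfer REP xs a hlen (fun x y hx hy => pvRep_pattern xs x y hx hy)
theorem pvEnumMap {α β : Type} (f : α → β) (xs : List α) (s : Int) :
    (PySem.List.enumerate xs s).map (fun p => (f p.2, p.1)) =
      (PySem.List.enumerate (xs.map f) s).map Prod.swap := by
  induction xs generalizing s with
  | nil => simp [PySem.List.enumerate_nil]
  | cons x xs ih => simp [PySem.List.enumerate_cons, ih]

theorem pvRangePairs {β : Type} (g : Int → β) (d : β) (N : Nat) :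
    (PySem.List.pyRange 0 (N : Int) 1).map (fun j => (g j, j)) =
      (PySem.List.enumerate ((PySem.List.pyRange 0 (N : Int) 1).map g) 0).map Prod.swap := by
  have hlen : (((PySem.List.pyRange 0 (N : Int) 1).map g).length) = N := by
    simp [PySem.List.length_pyRange_one]
  rw [PySem.List.enumerate_eq_map_pyRange _ d]
  rw [List.map_map]
  have hlen2 : PySem.List.len ((PySem.List.pyRange 0 (N : Int) 1).map g) = (N : Int) := by
    simp [hlen]
  rw [hlen2]
  apply List.map_congr_left
  intro j hj
  rw [PySem.List.mem_pyRange_one] at hj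
  simp only [Function.comp, Prod.swap]
  rw [PySem.List.pyGetD_map_pyRange_of_nonneg g (N : Int) j d (by omega) (by omega)]
theorem grid_symmetries_eq (grid : List String) :
    grid_symmetries grid = grid_symmetries_alt grid := by
  unfold grid_symmetries grid_symmetries_alt
  have hw : PySem.Str.len (PySem.List.pyGetD grid 0 "") =
      (((PySem.List.pyGetD grid 0 "").toList.length : Nat) : Int) := by
    simp [PySem.Str.len_eq]
  rw [hw, Prod.mk.injEq]
  refine ⟨?_, ?_⟩
  · rw [pvEnumMap String.toList grid 0]
    have h0 : grid.map (fun _ => (0 : Int)) =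
        List.replicate (grid.map String.toList).length (0 : Int) := by
      simp [List.map_const']
    rw [h0, pvCore]
    apply pvAxes_congr
    · simp
    · intro a b ha hb
      simp only [List.getElem?_map]
      rw [List.getElem?_eq_getElem ha, List.getElem?_eq_getElem hb]
      simp [String.toList_inj]
  · rw [pvRangePairs (fun j => grid.map (fun row => PySem.List.pyGetD row.toList j ' ')) []
        ((PySem.List.pyGetD grid 0 "").toList.length)]
    have h0 : (PySem.List.pyGetD grid 0 "").toList.map (fun _ => (0 : Int)) =
        List.replicate ((PySem.List.pyRange 0 (((PySem.List.pyGetD grid 0 "").toList.length : Nat) : Int) 1).map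
          (fun j => grid.map (fun row => PySem.List.pyGetD row.toList j ' '))).length (0 : Int) := by
      simp [List.map_const', PySem.List.length_pyRange_one]
    rw [h0, pvCore]

-- ===== VERDICT (by name: the statement is the Claim_ definition above) =====
theorem grid_symmetries_spec : Claim_equal_grid_symmetries := by
  intro grid _ _
  exact (grid_symmetries_eq grid).symm ▸ rfl
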